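-- pv_equiv track=rewrite | github.com/wowseok/Algorithm | 프로그래머스/unrated/135808. 과일 장수/과일 장수.py | solution
-- ===== SOURCE A (Python) =====
-- def solution(k, m, score):
--     answer = 0
--
--     score.sort()
--
--     r =len(score) % m
--
--
--     for i in range(r): #남는 사과만큼 버리기
--         score.pop(0)
--
--     for i in range(0,len(score),m):
--         answer = answer + score[i]*m
--
--
--     return answer
-- ===== SOURCE B (Python) =====
-- def solution(k, m, score):
--     # Return-value equivalence only: A sorts/pops `score` in place, B leaves it untouched.
--     counts = {}
--     for v in score:
--         counts[v] = counts.get(v, 0) + 1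
--     n = len(score)
--     q = n // m            # number of full boxes
--     r = n % m             # leftover fruit, discarded
--     total = 0
--     p = 0                 # first position of the current value-run in ascending order
--     t = 0                 # boxes whose minimum has been assigned
--     for v in sorted(counts):
--         c = counts[v]
--         # box minima sit at sorted positions r + m*t; collect those inside [p, p+c)
--         while t < q and r + m * t < p + c:
--             total += v
--             t += 1
--         p += c
--     return m * total
-- ===== Notes on version B (the rewrite author's own statement) =====
-- stated objective: faster
-- what changed: B never builds a fully sorted score array: it counts multiplicities in a dict in one pass, sorts only the distinct values, and walks the value-runs once with a box counter, assigning each box minimum by arithmetic on run boundaries (while t < boxes and r + m*t < p + c), instead of A's full ascending sort + O(n)-per-step pop(0) prefix removal + strided index loop; leftovers are skipped by starting at offset r = n % m.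
import Mathlib
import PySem

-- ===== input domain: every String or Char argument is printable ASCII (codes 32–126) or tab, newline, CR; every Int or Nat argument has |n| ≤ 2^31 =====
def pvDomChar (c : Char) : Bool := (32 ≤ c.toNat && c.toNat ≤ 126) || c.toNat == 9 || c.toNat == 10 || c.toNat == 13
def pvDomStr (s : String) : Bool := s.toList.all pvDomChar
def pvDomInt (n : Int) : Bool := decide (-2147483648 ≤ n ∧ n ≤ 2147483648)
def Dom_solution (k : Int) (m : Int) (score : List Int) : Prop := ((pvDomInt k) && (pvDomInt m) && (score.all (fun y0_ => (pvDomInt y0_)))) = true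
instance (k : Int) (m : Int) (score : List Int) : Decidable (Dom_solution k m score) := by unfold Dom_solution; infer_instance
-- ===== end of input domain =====

-- B counts multiplicities in a dict, sorts only the distinct values, and walks the value-runs
-- once with a box counter, instead of A's full sort + pop(0) loop + strided index loop.
-- Return-value equivalence only: A sorts and pops `score` in place, B leaves the argument untouched.

-- ===== PORT A =====
def solution (k : Int) (m : Int) (score : List Int) : Int :=
  let answer : Int := 0
  let score1 := PySem.List.sorted score (fun x => x) false          -- score.sort()
  let r : Int := PySem.Int.mod (score1.length : Int) m              -- r = len(score) % m
  -- for i in range(r): score.pop(0)   (pop? never fails here; the getD default is unreachable)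
  let score2 := (PySem.List.pyRange 0 r 1).foldl
    (fun st _ => ((PySem.List.pop? st 0).getD (0, st)).2) score1
  -- for i in range(0, len(score), m): answer = answer + score[i]*m
  let answer := (PySem.List.pyRange 0 (score2.length : Int) m).foldl
    (fun a i => a + PySem.List.pyGetD score2 i 0 * m) answer
  answer

-- ===== PORT B =====
-- while t < q and r + m * t < pc: total += v; t += 1       (pc = p + c is fixed during the while)
def bWhile (q r m v pc : Int) (total t : Int) : Int × Int :=
  if h : t < q ∧ r + m * t < pc then bWhile q r m v pc (total + v) (t + 1) else (total, t)
termination_by (q - t).toNat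
decreasing_by omega

def solution_alt (k : Int) (m : Int) (score : List Int) : Int :=
  -- counts[v] = counts.get(v, 0) + 1
  let counts := score.foldl (fun d v => PySem.Dict.insert d v (PySem.Dict.getD d v 0 + 1))
    (PySem.Dict.empty)
  let n : Int := (score.length : Int)
  let q := PySem.Int.floordiv n m                                   -- q = n // m
  let r := PySem.Int.mod n m                                        -- r = n % m
  -- for v in sorted(counts): c = counts[v]; while …; p += c    (state st = (total, p, t))
  let st := (PySem.List.sorted (PySem.Dict.keys counts) (fun x => x) false).foldl
    (fun (st : Int × Int × Int) v =>
      let c : Int := PySem.Dict.getD counts v 0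
      let w := bWhile q r m v (st.2.1 + c) st.1 st.2.2
      (w.1, st.2.1 + c, w.2))
    (0, 0, 0)
  m * st.1

-- ===== PRECONDITION & SPEC =====
-- Pre_ excludes only m = 0, where A raises ZeroDivisionError at `len(score) % m` (B's `n // m` raises too).
def Pre_solution (k : Int) (m : Int) (score : List Int) : Prop := m ≠ 0
instance (k : Int) (m : Int) (score : List Int) : Decidable (Pre_solution k m score) := by unfold Pre_solution; infer_instance
def pvWitness_solution : Int × Int × List Int := (4, 3, [1, 2, 3, 1, 2, 3, 1])
def Spec_solution (k : Int) (m : Int) (score : List Int) (out : Int) : Prop := out = solution_alt k m score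
instance (k : Int) (m : Int) (score : List Int) (out : Int) : Decidable (Spec_solution k m score out) := by unfold Spec_solution; infer_instance

-- ===== CLAIM (what is proved, stated in full; the proofs are below) =====
def Claim_equal_solution : Prop := ∀ (k : Int) (m : Int) (score : List Int), Dom_solution k m score → Pre_solution k m score → Spec_solution k m score (solution k m score)

-- ===== LEMMAS AND PROOFS =====

-- the pop(0)-loop drops the first rr elements
lemma pop_loop (rr : Nat) (l : List Int) (h : rr ≤ l.length) :
    (PySem.List.pyRange 0 (rr : Int) 1).foldl
      (fun st _ => ((PySem.List.pop? st 0).getD (0, st)).2) l = l.drop rr := by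
  induction rr with
  | zero => rw [Nat.cast_zero, PySem.List.pyRange_one_eq_nil le_rfl]; simp
  | succ n ih =>
      have hn : n < l.length := by omega
      have hcast : ((n + 1 : Nat) : Int) = (n : Int) + 1 := by push_cast; ring
      have hsplit : PySem.List.pyRange 0 ((n : Int) + 1) 1
          = PySem.List.pyRange 0 (n : Int) 1 ++ [(n : Int)] :=
        PySem.List.pyRange_one_succ_right (by positivity)
      rw [hcast, hsplit, List.foldl_append, ih (by omega)]
      simp only [List.foldl_cons, List.foldl_nil]
      rw [List.drop_eq_getElem_cons hn, PySem.List.pop?_zero_cons]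
      rfl

-- a strided positive-step range is an affine image of List.range
lemma stride_range_count (a b m : Int) (q : Nat) (hm : 0 < m)
    (hq : (if a < b then ((b - a + m - 1) / m).toNat else 0) = q) :
    PySem.List.pyRange a b m = (List.range q).map (fun k : Nat => a + m * (k : Int)) := by
  rw [PySem.List.pyRange_of_pos a b hm, hq]

-- the exited while loop returns its state unchanged
lemma bWhile_stop (q r m v pc total t : Int) (h : ¬(t < q ∧ r + m * t < pc)) :
    bWhile q r m v pc total t = (total, t) := by
  rw [bWhile, dif_neg h]

-- what the while loop computes, once a bound C with  r + m*u < pc ↔ u < C  is named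
lemma bWhile_spec (q r m v pc : Int) (C : Int)
    (hC : ∀ u : Int, r + m * u < pc ↔ u < C) :
    ∀ (k : Nat) (total t : Int), (q - t).toNat ≤ k →
      bWhile q r m v pc total t
        = (total + v * ((min q C - t).toNat : Int), t + ((min q C - t).toNat : Int)) := by
  intro k
  induction k with
  | zero =>
      intro total t hk
      have hq : ¬ (t < q) := by omega
      rw [bWhile_stop _ _ _ _ _ _ _ (fun hh => hq hh.1)]
      have h0 : (min q C - t).toNat = 0 := by omega
      simp [h0]
  | succ k ih =>
      intro total t hk
      by_cases h : t < q ∧ r + m * t < pc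
      · have htC : t < C := (hC t).mp h.2
        rw [bWhile, dif_pos h, ih (total + v) (t + 1) (by omega)]
        have hsucc : (min q C - t).toNat = (min q C - (t + 1)).toNat + 1 := by omega
        rw [hsucc]
        simp only [Prod.mk.injEq]
        constructor <;> push_cast <;> ring
      · rw [bWhile_stop _ _ _ _ _ _ _ h]
        have h0 : (min q C - t).toNat = 0 := by
          rcases not_and_or.mp h with h1 | h1
          · omega
          · have : ¬ (t < C) := fun hc => h1 ((hC t).mpr hc)
            omega
        simp [h0]

-- the ceiling bound the while loop stops at:  m*u < a  ↔  u < -((-a)/m)   (0 < m)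
lemma lt_ceil_iff (m a u : Int) (hm : 0 < m) : m * u < a ↔ u < -((-a) / m) := by
  constructor
  · intro h
    by_contra hc
    push_neg at hc
    have h1 : -u ≤ (-a) / m := by omega
    have h2 : -u * m ≤ -a := (Int.le_ediv_iff_mul_le hm).mp h1
    nlinarith
  · intro h
    by_contra hc
    push_neg at hc
    have h1 : -u * m ≤ -a := by nlinarith
    have h2 : -u ≤ (-a) / m := (Int.le_ediv_iff_mul_le hm).mpr h1
    omega

-- count of an element in a flatMap of constant runs over distinct values
lemma count_flatMap_replicate (cnt : Int → Nat) :
    ∀ (ks : List Int), ks.Nodup → ∀ a : Int,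
      (ks.flatMap (fun v => List.replicate (cnt v) v)).count a
        = if a ∈ ks then cnt a else 0 := by
  intro ks
  induction ks with
  | nil => intro _ a; simp
  | cons x t ih =>
      intro hnd a
      rw [List.flatMap_cons, List.count_append, List.count_replicate,
        ih hnd.of_cons a]
      by_cases hax : a = x
      · subst hax
        have : a ∉ t := (List.nodup_cons.mp hnd).1
        simp [this]
      · simp [hax, Ne.symm hax]

-- a flatMap of constant runs over strictly increasing values is sorted (≤)
lemma pairwise_le_flatMap (cnt : Int → Nat) :
    ∀ (ks : List Int), ks.Pairwise (· < ·) →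
      (ks.flatMap (fun v => List.replicate (cnt v) v)).Pairwise (fun a b : Int => a ≤ b) := by
  intro ks
  induction ks with
  | nil => intro _; simp
  | cons x t ih =>
      intro hp
      rw [List.flatMap_cons]
      apply List.pairwise_append.mpr
      refine ⟨?_, ih hp.of_cons, ?_⟩
      · exact List.pairwise_replicate.mpr (Or.inr le_rfl)
      · intro a ha b hb
        have hax : a = x := List.eq_of_mem_replicate ha
        obtain ⟨w, hw, hbw⟩ := List.mem_flatMap.mp hb
        have hbw' : b = w := List.eq_of_mem_replicate hbw
        have hxw : x < w := (List.pairwise_cons.mp hp).1 w hw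
        omega

-- the main run-walk invariant: folding B's loop body over value-runs that tile s.drop p
-- accumulates exactly the box minima s[rr + mm*t] for t in [tN, qN)
lemma loop_spec (mm rr qN : Nat) (hmm : 0 < mm) (s : List Int) (cnt : Int → Nat)
    (hq : ∀ t : Nat, t < qN → rr + mm * t < s.length) :
    ∀ (gs : List Int) (total : Int) (pN tN : Nat),
      s.drop pN = gs.flatMap (fun v => List.replicate (cnt v) v) →
      (pN ≤ rr + mm * tN ∨ qN ≤ tN) →
      (gs.foldl (fun (st : Int × Int × Int) v =>
          ((bWhile (qN : Int) (rr : Int) (mm : Int) v (st.2.1 + ((cnt v : Nat) : Int)) st.1 st.2.2).1,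
            st.2.1 + ((cnt v : Nat) : Int),
            (bWhile (qN : Int) (rr : Int) (mm : Int) v (st.2.1 + ((cnt v : Nat) : Int)) st.1 st.2.2).2))
        (total, (pN : Int), (tN : Int))).1
      = total + ∑ j ∈ Finset.Ico tN qN, s.getD (rr + mm * j) 0 := by
  intro gs
  induction gs with
  | nil =>
      intro total pN tN hsuf hinv
      have hlen : s.length ≤ pN := by
        have := congrArg List.length hsuf
        simp at this
        omega
      have htq : qN ≤ tN := by
        rcases hinv with h | h
        · by_contra hc
          push_neg at hc
          have := hq tN hc
          omega
        · exact h
      simp [Finset.Ico_eq_empty_of_le htq]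
  | cons v gs ih =>
      intro total pN tN hsuf hinv
      simp only [List.foldl_cons]
      have hsuf' : s.drop pN
          = List.replicate (cnt v) v ++ gs.flatMap (fun w => List.replicate (cnt w) w) := by
        simpa [List.flatMap_cons] using hsuf
      have hdrop' : s.drop (pN + cnt v) = gs.flatMap (fun w => List.replicate (cnt w) w) := by
        rw [← List.drop_drop, hsuf']
        simp
      have hlen : cnt v ≤ s.length - pN := by
        have h := congrArg List.length hsuf'
        rw [List.length_drop, List.length_append, List.length_replicate] at h
        omega
      have helem : ∀ i : Nat, i < cnt v → s.getD (pN + i) 0 = v := by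
        intro i hi
        have hlt : pN + i < s.length := by omega
        rw [List.getD_eq_getElem _ _ hlt]
        have h1 : s[pN + i] = (s.drop pN)[i]'(by simp; omega) := by
          rw [List.getElem_drop]
        rw [h1, List.getElem_of_eq hsuf' _, List.getElem_append_left (by simpa using hi),
          List.getElem_replicate]
      have hmm' : (0:Int) < (mm:Int) := by exact_mod_cast hmm
      set pc : Int := ((pN:Nat):Int) + ((cnt v : Nat):Int) with hpcdef
      set C : Int := -((-(pc - (rr:Int))) / (mm:Int)) with hCdef
      have hC : ∀ u : Int, (rr:Int) + (mm:Int) * u < pc ↔ u < C := by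
        intro u
        constructor
        · intro h
          exact (lt_ceil_iff (mm:Int) (pc - rr) u hmm').mp (by omega)
        · intro h
          have := (lt_ceil_iff (mm:Int) (pc - rr) u hmm').mpr h
          omega
      rw [bWhile_spec (qN:Int) (rr:Int) (mm:Int) v pc C hC (((qN:Int) - (tN:Int)).toNat)
        total (tN:Int) le_rfl]
      set cntI : Nat := (min (qN:Int) C - (tN:Int)).toNat with hcntI
      have hpc : pc = ((pN + cnt v : Nat) : Int) := by push_cast; ring
      have htc : ((tN:Nat):Int) + ((cntI:Nat):Int) = ((tN + cntI : Nat) : Int) := by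
        push_cast; ring
      rw [hpc, htc]
      have hinv' : pN + cnt v ≤ rr + mm * (tN + cntI) ∨ qN ≤ tN + cntI := by
        rcases le_or_gt (qN:Int) ((tN:Int) + (cntI:Int)) with h | h
        · right; exact_mod_cast h
        · left
          have hnot : ¬ (((tN:Int) + (cntI:Int)) < C) := by omega
          have h2 : ¬ ((rr:Int) + (mm:Int) * (((tN:Nat):Int) + ((cntI:Nat):Int)) < pc) :=
            fun hh => hnot ((hC _).mp hh)
          have h3 : ((pN + cnt v : Nat):Int) ≤ (rr:Int) + (mm:Int) * ((tN + cntI : Nat):Int) := by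
            rw [← hpc, ← htc]; omega
          exact_mod_cast h3
      rw [ih (total + v * ((cntI:Nat):Int)) (pN + cnt v) (tN + cntI) hdrop' hinv']
      rcases Nat.eq_zero_or_pos cntI with h0 | hposc
      · simp [h0]
      · have htmin : ((tN:Nat):Int) < min (qN:Int) C := by omega
        have htq' : tN + cntI ≤ qN := by
          have h4 : ((tN:Nat):Int) + ((cntI:Nat):Int) ≤ ((qN:Nat):Int) := by omega
          exact_mod_cast h4
        have htnq : tN < qN := by
          have h5 : ((tN:Nat):Int) < ((qN:Nat):Int) :=
            lt_of_lt_of_le htmin (min_le_left _ _)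
          exact_mod_cast h5
        rw [← Finset.sum_Ico_consecutive _ (Nat.le_add_right tN cntI) htq']
        have hconst : ∀ j ∈ Finset.Ico tN (tN + cntI), s.getD (rr + mm * j) 0 = v := by
          intro j hj
          obtain ⟨hj1, hj2⟩ := Finset.mem_Ico.mp hj
          have hjC : ((j:Nat):Int) < C := by
            have h6 : ((j:Nat):Int) < ((tN:Nat):Int) + ((cntI:Nat):Int) := by exact_mod_cast hj2
            omega
          have hup : (rr:Int) + (mm:Int) * ((j:Nat):Int) < pc := (hC _).mpr hjC
          have hupN : rr + mm * j < pN + cnt v := by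
            have h7 : (rr:Int) + (mm:Int) * ((j:Nat):Int) < ((pN + cnt v : Nat):Int) := by
              rw [← hpc]; omega
            exact_mod_cast h7
          have hlow : pN ≤ rr + mm * j := by
            rcases hinv with h | h
            · have hmul : mm * tN ≤ mm * j := Nat.mul_le_mul_left mm hj1
              omega
            · omega
          have hv := helem (rr + mm * j - pN) (by omega)
          rw [show rr + mm * j = pN + (rr + mm * j - pN) by omega]
          exact hv
        rw [Finset.sum_congr rfl hconst, Finset.sum_const, Nat.card_Ico]
        rw [nsmul_eq_mul, Nat.add_sub_cancel_left]
        ring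

-- a fold preserving "total = 0 and t = 0" ends with total = 0  (the m < 0 case)
lemma foldl_pres (g : Int × Int × Int → Int → Int × Int × Int)
    (hg : ∀ st v, st.1 = 0 → st.2.2 = 0 → (g st v).1 = 0 ∧ (g st v).2.2 = 0) :
    ∀ (ks : List Int) (st : Int × Int × Int), st.1 = 0 → st.2.2 = 0 →
      (ks.foldl g st).1 = 0 := by
  intro ks
  induction ks with
  | nil => intro st h1 _; simpa using h1
  | cons v t ih =>
      intro st h1 h2
      have h := hg st v h1 h2
      exact ih _ h.1 h.2

-- the ascending sort is the concatenation of constant runs over the sorted distinct values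
lemma sorted_eq_flatMap_runs (score : List Int) :
    PySem.List.sorted score (fun x => x) false
      = (PySem.List.sorted (PySem.Set.ofList score) (fun x => x) false).flatMap
          (fun v => List.replicate (score.count v) v) := by
  set ks := PySem.List.sorted (PySem.Set.ofList score) (fun x => x) false with hks
  have hlt : ks.Pairwise (· < ·) := PySem.List.sorted_ofList_pairwise_lt score
  have hnd : ks.Nodup := hlt.imp (fun h => ne_of_lt h)
  have hmemks : ∀ a : Int, a ∈ ks ↔ a ∈ score := by
    intro a
    rw [hks, PySem.List.mem_sorted, PySem.Set.mem_ofList]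
  apply PySem.List.sorted_id_eq_of_perm_of_pairwise
  · rw [List.perm_iff_count]
    intro a
    rw [count_flatMap_replicate (fun v => score.count v) ks hnd a]
    by_cases ha : a ∈ score
    · simp [(hmemks a).mpr ha]
    · have h1 : a ∉ ks := fun h => ha ((hmemks a).mp h)
      simp [h1, List.count_eq_zero.mpr ha]
  · exact pairwise_le_flatMap _ ks hlt

-- ===== VERDICT (by name: the statement is the Claim_ definition above) =====
theorem solution_spec : Claim_equal_solution := by
  intro k m score _ hm
  unfold Spec_solution solution solution_alt
  dsimp only
  rw [PySem.Dict.foldl_insert_getD_add_one_eq_counter]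
  simp only [PySem.Dict.getD_counter, PySem.Dict.keys_counter]
  rcases lt_or_gt_of_ne hm with hneg | hpos
  · -- m < 0 : A's ranges are empty (answer 0); B's box count n // m is ≤ 0, so total stays 0
    have hq0 : ¬ ((0:Int) < PySem.Int.floordiv (↑score.length) m) := by
      intro hq
      have h1 := PySem.Int.floordiv_mul_add_mod (↑score.length : Int) m
      have h2 := PySem.Int.mod_neg_bounds (↑score.length : Int) hneg
      have h3 : (1:Int) ≤ PySem.Int.floordiv (↑score.length) m := hq
      have h4 : PySem.Int.floordiv (↑score.length) m * m ≤ 1 * m :=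
        mul_le_mul_of_nonpos_right h3 (le_of_lt hneg)
      have h5 : (0:Int) ≤ (score.length : Int) := Int.natCast_nonneg _
      omega
    have hpop0 : PySem.Int.mod (↑(PySem.List.sorted score (fun x => x) false).length) m ≤ 0 :=
      (PySem.Int.mod_neg_bounds _ hneg).2
    have hnlt : ¬ ((↑(PySem.List.sorted score (fun x => x) false).length : Int) < 0) := by
      have := Int.natCast_nonneg (PySem.List.sorted score (fun x => x) false).length
      omega
    have hgen1 : PySem.List.pyRange 0 (↑(PySem.List.sorted score (fun x => x) false).length) m = [] := by
      rw [PySem.List.pyRange_of_neg _ _ hneg, if_neg hnlt]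
      simp
    rw [PySem.List.pyRange_one_eq_nil hpop0]
    simp only [List.foldl_nil]
    rw [hgen1]
    simp only [List.foldl_nil]
    have hB : (List.foldl
        (fun (st : Int × Int × Int) v =>
          ((bWhile (PySem.Int.floordiv (↑score.length) m) (PySem.Int.mod (↑score.length) m) m v
                (st.2.1 + ↑(List.count v score)) st.1 st.2.2).1,
            st.2.1 + ↑(List.count v score),
            (bWhile (PySem.Int.floordiv (↑score.length) m) (PySem.Int.mod (↑score.length) m) m v
                (st.2.1 + ↑(List.count v score)) st.1 st.2.2).2))
        (0, 0, 0)
        (PySem.List.sorted (PySem.Set.ofList score) (fun x => x) false)).1 = 0 := by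
      apply foldl_pres
      · intro st v h1 h2
        dsimp only
        rw [h1, h2, bWhile_stop _ _ _ _ _ _ _ (fun hh => hq0 hh.1)]
        exact ⟨rfl, rfl⟩
      · rfl
      · rfl
    rw [hB, mul_zero]
  · -- m > 0
    obtain ⟨mm, rfl⟩ : ∃ mm : Nat, m = (mm : Int) := ⟨m.toNat, (Int.toNat_of_nonneg hpos.le).symm⟩
    have hmm : 0 < mm := by exact_mod_cast hpos
    set s := PySem.List.sorted score (fun x => x) false with hs
    have hslen : s.length = score.length := PySem.List.length_sorted score _ false
    rw [show score.length = s.length from hslen.symm]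
    set n := s.length with hn
    rw [PySem.Int.mod_natCast, PySem.Int.floordiv_natCast]
    set rr := n % mm with hrr
    set q := n / mm with hq
    have hdm := Nat.div_add_mod n mm
    rw [← hq, ← hrr] at hdm
    have hnq : n - rr = q * mm := by rw [Nat.mul_comm]; omega
    have hrle : rr ≤ n := Nat.mod_le n mm
    have hrlt : rr < mm := Nat.mod_lt n hmm
    rw [pop_loop rr s hrle]
    have hlen2 : (((s.drop rr).length : Nat) : Int) = ((n - rr : Nat) : Int) := by
      simp only [List.length_drop, ← hn]
    -- A's strided range has exactly q indices
    have hcntA : (if (0:Int) < ((n - rr : Nat) : Int)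
        then ((((n - rr : Nat) : Int) - 0 + (mm : Int) - 1) / (mm : Int)).toNat else 0) = q := by
      by_cases h0 : 0 < n - rr
      · rw [if_pos (show (0:Int) < ((n - rr : Nat) : Int) by exact_mod_cast h0)]
        have hv : (((n - rr : Nat) : Int) - 0 + (mm : Int) - 1) / (mm : Int) = (q : Int) := by
          have hrew : (((n - rr : Nat) : Int) - 0 + (mm : Int) - 1) = ((mm : Int) - 1) + (q : Int) * mm := by
            rw [hnq]; push_cast [Nat.cast_mul]; ring
          rw [hrew, Int.add_mul_ediv_right _ _ (show ((mm : Int)) ≠ 0 by exact_mod_cast hmm.ne'),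
            Int.ediv_eq_zero_of_lt (by omega) (by omega)]
          ring
        rw [hv, Int.toNat_natCast]
      · rw [if_neg (show ¬ (0:Int) < ((n - rr : Nat) : Int) by exact_mod_cast h0)]
        have hq0 : q = 0 := by
          rcases Nat.mul_eq_zero.mp (show q * mm = 0 by omega) with h | h
          · exact h
          · omega
        omega
    rw [hlen2, stride_range_count 0 _ _ q (by exact_mod_cast hmm) hcntA]
    rw [PySem.List.foldl_add, List.map_map]
    have bridgeA : ((List.range q).map ((fun i => PySem.List.pyGetD (s.drop rr) i 0 * (mm : Int)) ∘ (fun k : Nat => 0 + (mm : Int) * (k : Int)))).sum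
        = ∑ j ∈ Finset.range q, PySem.List.pyGetD (s.drop rr) (0 + (mm : Int) * (j : Int)) 0 * (mm : Int) := rfl
    rw [bridgeA]
    have entryA : ∀ j < q, PySem.List.pyGetD (s.drop rr) (0 + (mm : Int) * (j : Int)) 0 = s.getD (rr + mm * j) 0 := by
      intro j hj
      have hjq : mm * j + mm ≤ mm * q := by
        have h := Nat.mul_le_mul_left mm (show j + 1 ≤ q from hj)
        simpa [Nat.mul_succ] using h
      have hnq' : n - rr = mm * q := by rw [hnq]; ring
      have hlt : mm * j < (s.drop rr).length := by
        simp only [List.length_drop, ← hn]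
        omega
      have hcast : (0 + (mm : Int) * (j : Int)) = ((mm * j : Nat) : Int) := by push_cast; ring
      rw [hcast, PySem.List.pyGetD_natCast]
      rw [List.getD_eq_getElem _ _ hlt, List.getElem_drop]
      rw [List.getD_eq_getElem _ _ (show rr + mm * j < s.length by rw [← hn]; omega)]
    rw [Finset.sum_congr rfl (fun j hj => by rw [entryA j (Finset.mem_range.mp hj)])]
    -- B side
    have hqbound : ∀ t : Nat, t < q → rr + mm * t < s.length := by
      intro t ht
      have hmul : mm * t + mm ≤ mm * q := by
        have h := Nat.mul_le_mul_left mm (show t + 1 ≤ q from ht)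
        simpa [Nat.mul_succ] using h
      rw [← hn]
      omega
    have hsuf : s.drop 0 = (PySem.List.sorted (PySem.Set.ofList score) (fun x => x) false).flatMap
        (fun v => List.replicate (List.count v score) v) := by
      rw [List.drop_zero, hs]
      exact sorted_eq_flatMap_runs score
    have hloop := loop_spec mm rr q hmm s (fun v => List.count v score) hqbound
      (PySem.List.sorted (PySem.Set.ofList score) (fun x => x) false) 0 0 0 hsuf
      (Or.inl (Nat.zero_le _))
    simp only [Nat.cast_zero] at hloop
    rw [hloop]
    rw [Finset.range_eq_Ico, ← Finset.sum_mul]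
    ring
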